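-- pv_equiv track=rewrite | github.com/JimmySunDance/advent-of-code-23 | day14.py | slide_rocks
-- ===== SOURCE A (Python) =====
-- def slide_rocks(grid):
--     new_grid=[]
--     for line in grid:
--         roll=[]
--         for group in line.split('#'):
--             roll.append("".join(sorted(list(group), reverse=True)))
--         new_pos = '#'.join(roll)
--         new_grid.append(new_pos)
--     return tuple(new_grid)
-- ===== SOURCE B (Python) =====
-- def slide_rocks(grid):
--     new_grid = []
--     for line in grid:
--         parts = []
--         for group in line.split('#'):
--             counts = {}
--             for ch in group:
--                 counts[ch] = counts.get(ch, 0) + 1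
--             parts.append(''.join(ch * counts[ch] for ch in sorted(counts, reverse=True)))
--         new_grid.append('#'.join(parts))
--     return tuple(new_grid)
-- ===== Notes on version B (the rewrite author's own statement) =====
-- stated objective: alternative
-- what changed: Each '#'-delimited group is rebuilt from a one-pass character-count dict (each distinct character emitted in descending order, repeated by its count) instead of comparison-sorting all of the group's characters.
import Mathlib
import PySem

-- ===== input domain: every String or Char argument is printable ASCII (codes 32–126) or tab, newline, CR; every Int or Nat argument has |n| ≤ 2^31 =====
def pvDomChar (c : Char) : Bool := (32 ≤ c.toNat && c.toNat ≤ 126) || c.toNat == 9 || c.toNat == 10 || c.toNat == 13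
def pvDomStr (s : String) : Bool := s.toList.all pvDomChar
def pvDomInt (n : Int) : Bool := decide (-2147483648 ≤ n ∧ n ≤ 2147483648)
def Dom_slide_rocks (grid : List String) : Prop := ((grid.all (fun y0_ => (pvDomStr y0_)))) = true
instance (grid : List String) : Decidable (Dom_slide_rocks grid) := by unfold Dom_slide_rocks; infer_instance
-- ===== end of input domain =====

-- B rebuilds each '#'-delimited group from a one-pass character-count dict (emit each distinct
-- character, in descending order, repeated by its count) instead of comparison-sorting the group.

-- ===== PORT A =====
def slide_rocks (grid : List String) : List String :=
  grid.foldl (fun new_grid line =>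
    let roll := (PySem.Chars.splitOn line.toList ['#']).foldl
      (fun roll group => roll ++ [PySem.List.sorted group (fun x => x) true]) []
    new_grid ++ [String.ofList (PySem.Chars.join ['#'] roll)]) []

-- ===== PORT B =====
-- counts = {}; for ch in group: counts[ch] = counts.get(ch, 0) + 1
-- ''.join(ch * counts[ch] for ch in sorted(counts, reverse=True))
def altGroup (group : List Char) : List Char :=
  let counts : PySem.Dict Char Int :=
    group.foldl (fun d ch => d.insert ch (d.getD ch 0 + 1)) PySem.Dict.empty
  (PySem.List.sorted counts.keys (fun x => x) true).flatMap
    (fun ch => PySem.List.pyRepeat [ch] (counts.getD ch 0))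

def slide_rocks_alt (grid : List String) : List String :=
  grid.foldl (fun new_grid line =>
    let parts := (PySem.Chars.splitOn line.toList ['#']).foldl
      (fun parts group => parts ++ [altGroup group]) []
    new_grid ++ [String.ofList (PySem.Chars.join ['#'] parts)]) []

-- ===== PRECONDITION & SPEC =====
def Spec_slide_rocks (grid : List String) (out : List String) : Prop := out = slide_rocks_alt grid
instance (grid : List String) (out : List String) : Decidable (Spec_slide_rocks grid out) := by unfold Spec_slide_rocks; infer_instance

-- ===== CLAIM (what is proved, stated in full; the proofs are below) =====
def Claim_equal_slide_rocks : Prop := ∀ (grid : List String), Dom_slide_rocks grid → Spec_slide_rocks grid (slide_rocks grid)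

-- ===== LEMMAS AND PROOFS =====

theorem sum_indicator {α : Type} [DecidableEq α] (l : List α) (hnd : l.Nodup) (k : α)
    (v : α → Nat) :
    (l.map (fun c => if c = k then v c else 0)).sum = if k ∈ l then v k else 0 := by
  induction l with
  | nil => simp
  | cons a t ih =>
    simp only [List.nodup_cons] at hnd
    simp only [List.map_cons, List.sum_cons, ih hnd.2, List.mem_cons]
    by_cases hak : a = k
    · subst hak
      simp [hnd.1]
    · simp [hak, Ne.symm hak]

-- sorting a group in descending order is the same as emitting each distinct character,
-- in descending order, repeated by its multiplicity
theorem altGroup_eq (cs : List Char) :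
    PySem.List.sorted cs (fun x => x) true = altGroup cs := by
  unfold altGroup
  have hgetD : ∀ ch : Char,
      ((cs.foldl (fun d ch => d.insert ch (d.getD ch 0 + 1)) PySem.Dict.empty).getD ch 0)
        = (cs.count ch : Int) := by
    intro ch
    rw [PySem.Dict.getD_foldl_insert_add_one]
    simp [PySem.Dict.getD_empty]
  have hkeys : (cs.foldl (fun d ch => d.insert ch (d.getD ch 0 + 1))
      (PySem.Dict.empty : PySem.Dict Char Int)).keys = PySem.Set.ofList cs := by
    rw [PySem.Dict.keys_foldl_insert, PySem.Dict.keys_empty, PySem.Set.ofList_eq_foldl]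
    rfl
  simp only [hgetD, PySem.List.pyRepeat_singleton, Int.toNat_natCast]
  rw [hkeys]
  set ks := PySem.List.sorted (PySem.Set.ofList cs) (fun x => x) true with hks
  have hknodup : ks.Nodup :=
    (PySem.List.sorted_perm (PySem.Set.ofList cs) (fun x => x) true).nodup_iff.mpr
      (PySem.Set.nodup_ofList cs)
  have hkmem : ∀ a : Char, a ∈ ks ↔ a ∈ cs := by
    intro a
    rw [hks, PySem.List.mem_sorted, PySem.Set.mem_ofList]
  -- the two lists are permutations of each other (equal counts everywhere)
  have hperm : (PySem.List.sorted cs (fun x => x) true).Perm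
      (ks.flatMap (fun ch => List.replicate (cs.count ch) ch)) := by
    refine (PySem.List.sorted_perm cs (fun x => x) true).trans (List.perm_iff_count.mpr ?_)
    intro a
    rw [List.count_flatMap]
    have hmap : ∀ c ∈ ks,
        (List.count a ∘ fun ch => List.replicate (cs.count ch) ch) c
          = (fun c => if c = a then cs.count c else 0) c := by
      intro c _
      simp only [Function.comp_apply, List.count_replicate, beq_iff_eq]
    rw [List.map_congr_left hmap, sum_indicator ks hknodup a]
    by_cases ha : a ∈ cs
    · rw [if_pos ((hkmem a).mpr ha)]
    · rw [if_neg (fun hk => ha ((hkmem a).mp hk)), List.count_eq_zero.mpr ha]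
  -- both lists are in (weakly) descending order
  have hp1 : List.Pairwise (fun a b : Char => b ≤ a) (PySem.List.sorted cs (fun x => x) true) :=
    PySem.List.sorted_pairwise_rev cs (fun x => x)
  have hp2 : List.Pairwise (fun a b : Char => b ≤ a)
      (ks.flatMap (fun ch => List.replicate (cs.count ch) ch)) := by
    rw [List.pairwise_flatMap]
    constructor
    · intro c _
      exact (List.pairwise_replicate).mpr (Or.inr le_rfl)
    · refine (PySem.List.sorted_pairwise_rev (PySem.Set.ofList cs) (fun x => x)).imp ?_
      intro c d hle x hx y hy
      rw [List.eq_of_mem_replicate hx, List.eq_of_mem_replicate hy]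
      exact hle
  exact List.Perm.eq_of_pairwise (fun a b _ _ hab hba => le_antisymm hba hab) hp1 hp2 hperm

-- ===== VERDICT (by name: the statement is the Claim_ definition above) =====
theorem slide_rocks_spec : Claim_equal_slide_rocks := by
  intro grid _
  unfold Spec_slide_rocks slide_rocks slide_rocks_alt
  rw [PySem.List.foldl_append_singleton_eq_map, PySem.List.foldl_append_singleton_eq_map]
  simp only [List.nil_append]
  apply List.map_congr_left
  intro line _
  rw [PySem.List.foldl_append_singleton_eq_map, PySem.List.foldl_append_singleton_eq_map]
  simp only [List.nil_append]
  congr 2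
  exact List.map_congr_left (fun group _ => altGroup_eq group)
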